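-- pv_equiv track=rewrite | github.com/edson89braga/docs_analyzer_3 | src/flet_ui/layout.py | _find_nav_index_for_route
-- ===== SOURCE A (Python) =====
-- from typing import List, Dict, Any, Optional
--
-- route_to_base_nav_index: Dict[str, int] = {
--     # Raiz do app, geralmente redireciona para /home ou /dashboard
--     "/": 0,
--     "/home": 0,
--     "/analyze_pdf": 1,
--     "/chat_pdf": 2,
--     "/knowledge_base": 3,
--     "/wiki_rotinas": 4,
--     "/correicao_processos": 5,
--     "/roteiro_investigacoes": 6,
-- }
--
-- def _find_nav_index_for_route(route: str) -> int:
--     """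
--     Encontra o índice da NavigationRail correspondente a uma dada rota.
--
--     Prioriza rotas mais específicas (maiores) e lida com sub-rotas.
--
--     Args:
--         route (str): A rota atual da página.
--
--     Returns:
--         int: O índice do item da NavigationRail que deve ser selecionado.
--     """
--     selected_index = 0  # Índice padrão para a rota de início/dashboard
--     best_match_len = 0
--
--     # A rota base "/" deve ter prioridade baixa se outra rota mais específica corresponder.
--     # Define um comprimento mínimo para a raiz para que rotas mais específicas a substituam.
--     if route == "/":
--         best_match_len = 1
--
--     for base_route, index in route_to_base_nav_index.items():
--         # Ignora a rota raiz "/" na checagem de prefixo se a rota atual for diferente dela,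
--         # pois a rota "/" é um caso especial que já foi tratado ou será tratado por correspondência exata.
--         if base_route == "/" and route != "/":
--             continue
--
--         is_exact_match = (route == base_route)
--         # Verifica se a rota atual começa com a rota base seguida por um '/' (indicando uma sub-rota).
--         # Exclui o caso de `base_route` ser apenas "/" para evitar correspondências indesejadas.
--         is_prefix_match = (base_route != "/" and route.startswith(base_route + "/"))
--
--         if is_exact_match or is_prefix_match:
--             current_match_len = len(base_route)
--             # Se a rota base atual for mais longa (mais específica) que a melhor encontrada até agora,
--             # atualiza o melhor índice.
--             if current_match_len > best_match_len:
--                 best_match_len = current_match_len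
--                 selected_index = index
--             # Caso especial: Se a rota atual for EXATAMENTE igual a uma rota base de mesmo comprimento
--             # que a melhor encontrada, e o índice for diferente, prioriza a correspondência exata.
--             # Isso é uma medida defensiva para garantir a seleção correta em cenários ambíguos,
--             # embora improvável com a estrutura de rotas atual.
--             elif current_match_len == best_match_len and is_exact_match and selected_index != index:
--                 selected_index = index
--
--     return selected_index
-- ===== SOURCE B (Python) =====
-- from typing import Dict
--
-- route_to_base_nav_index: Dict[str, int] = {
--     "/": 0,
--     "/home": 0,
--     "/analyze_pdf": 1,
--     "/chat_pdf": 2,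
--     "/knowledge_base": 3,
--     "/wiki_rotinas": 4,
--     "/correicao_processos": 5,
--     "/roteiro_investigacoes": 6,
-- }
--
-- def _find_nav_index_for_route(route: str) -> int:
--     # Walk the route's '/'-boundary prefixes from longest to shortest and
--     # return the index of the first one that is a known base route.
--     cand = route
--     while cand:
--         if cand in route_to_base_nav_index:
--             return route_to_base_nav_index[cand]
--         i = cand.rfind('/')
--         cand = cand[:i] if i != -1 else ''
--     return 0
-- ===== Notes on version B (the rewrite author's own statement) =====
-- stated objective: simpler
-- what changed: B inverts the search: instead of scanning every dict entry while tracking the longest match, it walks the route's slash-boundary prefixes from longest to shortest and returns the dict value of the first prefix that is a key, defaulting to index 0 when none is.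
import Mathlib
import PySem

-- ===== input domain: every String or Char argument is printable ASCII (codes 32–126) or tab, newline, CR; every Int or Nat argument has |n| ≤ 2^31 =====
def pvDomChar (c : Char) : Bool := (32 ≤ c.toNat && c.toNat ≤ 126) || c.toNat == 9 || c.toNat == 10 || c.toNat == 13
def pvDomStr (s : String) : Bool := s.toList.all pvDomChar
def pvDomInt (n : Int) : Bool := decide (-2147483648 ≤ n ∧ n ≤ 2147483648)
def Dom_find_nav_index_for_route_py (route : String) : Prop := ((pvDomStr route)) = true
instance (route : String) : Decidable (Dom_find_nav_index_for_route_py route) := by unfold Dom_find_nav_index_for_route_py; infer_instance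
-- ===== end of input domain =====

-- B replaces the dictionary scan with best-match bookkeeping by a longest-to-shortest walk over
-- the route's '/'-boundary prefixes, returning the first prefix found in the dict (objective: simpler).

-- ===== PORT A =====
-- module constant route_to_base_nav_index (dict[str,int]); keys kept as List Char for PySem string work
def navItems : List (List Char × Int) :=
  [("/".toList, 0), ("/home".toList, 0), ("/analyze_pdf".toList, 1), ("/chat_pdf".toList, 2),
   ("/knowledge_base".toList, 3), ("/wiki_rotinas".toList, 4),
   ("/correicao_processos".toList, 5), ("/roteiro_investigacoes".toList, 6)]

def navDict : PySem.Dict (List Char) Int := PySem.Dict.ofList navItems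

-- loop body of A's for-loop over the dict items (state: (selected_index, best_match_len))
def aStep (rt : List Char) (s : Int × Int) (p : List Char × Int) : Int × Int :=
  if p.1 = ['/'] ∧ rt ≠ ['/'] then s
  else
    if rt = p.1 ∨ (p.1 ≠ ['/'] ∧ PySem.Chars.startswith rt (p.1 ++ ['/']) = true) then
      if (p.1.length : Int) > s.2 then (p.2, (p.1.length : Int))
      else if (p.1.length : Int) = s.2 ∧ rt = p.1 ∧ s.1 ≠ p.2 then (p.2, s.2)
      else s
    else s

def aGo (rt : List Char) : Int :=
  (navDict.items.foldl (aStep rt) (0, if rt = ['/'] then 1 else 0)).1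

def find_nav_index_for_route_py (route : String) : Int := aGo route.toList

-- ===== PORT B =====
-- termination facts about Python's str.rfind, used by bGo's decreasing_by (stated here because the
-- port cites them; proved below the claim block)
theorem rgo_spec (s sub : List Char) (j : Nat) (h : PySem.Chars.rfind.go s sub j ≠ -1) :
    ∃ p : Nat, p ≤ j ∧ PySem.Chars.rfind.go s sub j = (p : Int) ∧ sub.isPrefixOf (s.drop p) := by
  induction j with
  | zero =>
    simp only [PySem.Chars.rfind.go] at h ⊢
    by_cases hp : sub.isPrefixOf s
    · exact ⟨0, le_refl _, by simp [hp], by simpa using hp⟩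
    · simp [hp] at h
  | succ j ih =>
    simp only [PySem.Chars.rfind.go] at h ⊢
    by_cases hp : sub.isPrefixOf (s.drop (j+1))
    · exact ⟨j+1, le_refl _, by simp [hp], hp⟩
    · simp only [hp] at h ⊢
      obtain ⟨p, hpj, he, hpre⟩ := ih h
      exact ⟨p, Nat.le_succ_of_le hpj, he, hpre⟩

theorem rfind_slash_lt (cand : List Char) (h : PySem.Chars.rfind cand ['/'] ≠ -1) :
    0 ≤ PySem.Chars.rfind cand ['/'] ∧ (PySem.Chars.rfind cand ['/']).toNat < cand.length ∧
      (['/'] : List Char).isPrefixOf (cand.drop (PySem.Chars.rfind cand ['/']).toNat) := by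
  obtain ⟨p, _, he, hpre⟩ := rgo_spec cand ['/'] cand.length h
  unfold PySem.Chars.rfind at *
  rw [he]
  refine ⟨Int.natCast_nonneg p, ?_, by simpa using hpre⟩
  simp only [Int.toNat_natCast]
  by_contra hge
  rw [List.drop_eq_nil_of_le (by omega)] at hpre
  simp [List.isPrefixOf] at hpre

def bGo (cand : List Char) : Int :=
  if hc : cand = [] then 0
  else
    match navDict.get? cand with
    | some v => v
    | none =>
      let i := PySem.Chars.rfind cand ['/']
      if hi : i = -1 then bGo []
      else bGo (PySem.Chars.slice cand none (some i))
termination_by cand.length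
decreasing_by
  · simpa using List.length_pos_of_ne_nil hc
  · obtain ⟨h0, hlt, _⟩ := rfind_slash_lt cand hi
    simp only [PySem.Chars.slice_eq_listSlice, PySem.List.slice_to cand h0]
    calc (cand.take i.toNat).length ≤ i.toNat := by simp
      _ < cand.length := hlt

def find_nav_index_for_route_py_alt (route : String) : Int := bGo route.toList

-- ===== PRECONDITION & SPEC =====
def Spec_find_nav_index_for_route_py (route : String) (out : Int) : Prop := out = find_nav_index_for_route_py_alt route
instance (route : String) (out : Int) : Decidable (Spec_find_nav_index_for_route_py route out) := by unfold Spec_find_nav_index_for_route_py; infer_instance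

-- ===== CLAIM (what is proved, stated in full; the proofs are below) =====
def Claim_equal_find_nav_index_for_route_py : Prop := ∀ (route : String), Dom_find_nav_index_for_route_py route → Spec_find_nav_index_for_route_py route (find_nav_index_for_route_py route)


-- ===== LEMMAS AND PROOFS =====

theorem navDict_mk : navDict = PySem.Dict.mk navItems := by decide

theorem items_eq : navDict.items = navItems := by decide

-- the loop condition of A for one dict entry
def C (k rt : List Char) : Prop := rt = k ∨ (k ≠ ['/'] ∧ PySem.Chars.startswith rt (k ++ ['/']) = true)

theorem C_iff (k rt : List Char) (hk : k ≠ ['/']) :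
    C k rt ↔ (rt = k ∨ k ++ ['/'] <+: rt) := by
  unfold C
  simp [hk, PySem.Chars.startswith_iff]

theorem aStep_root (rt : List Char) (s : Int × Int) (h0 : rt ≠ ['/']) :
    aStep rt s ("/".toList, 0) = s := by
  simp [aStep, h0]

theorem aStep_no (rt : List Char) (s : Int × Int) (p : List Char × Int)
    (hp : p.1 ≠ ['/']) (h : ¬ C p.1 rt) : aStep rt s p = s := by
  unfold C at h
  rw [aStep, if_neg (fun hh => hp hh.1), if_neg h]

theorem aStep_yes (rt : List Char) (s : Int × Int) (p : List Char × Int)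
    (h : C p.1 rt) (hgt : s.2 < (p.1.length : Int)) : aStep rt s p = (p.2, (p.1.length : Int)) := by
  unfold C at h
  rw [aStep, if_neg, if_pos h, if_pos hgt]
  rintro ⟨he, hne⟩
  rcases h with h | h
  · exact hne (h.trans he)
  · exact h.1 he

theorem get?_cases (cand : List Char) (v : Int) (h : navDict.get? cand = some v) :
    (cand, v) ∈ navItems := by
  rw [navDict_mk] at h
  simp only [navItems, PySem.Dict.get?_mk_cons] at h
  split_ifs at h with h1 h2 h3 h4 h5 h6 h7 h8 <;> simp_all [navItems, PySem.Dict.get?]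

theorem keys_shape : ∀ kv ∈ navItems, kv.1.head? = some '/' ∧ '/' ∉ kv.1.tail := by decide

theorem keys_tails : ∀ kv ∈ navItems, kv.1.tail = "".toList ∨ kv.1.tail = "home".toList ∨
    kv.1.tail = "analyze_pdf".toList ∨ kv.1.tail = "chat_pdf".toList ∨
    kv.1.tail = "knowledge_base".toList ∨ kv.1.tail = "wiki_rotinas".toList ∨
    kv.1.tail = "correicao_processos".toList ∨ kv.1.tail = "roteiro_investigacoes".toList := by decide

theorem tw_self (t : List Char) (ht : '/' ∉ t) :
    List.takeWhile (fun x => !decide (x = '/')) t = t :=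
  List.takeWhile_eq_self_iff.mpr (by intro a ha; simp; rintro rfl; exact ht ha)

theorem match_shape (k rt t : List Char) (hk : k = '/' :: t) (ht : '/' ∉ t)
    (h : rt = k ∨ k ++ ['/'] <+: rt) :
    rt.head? = some '/' ∧ t = rt.tail.takeWhile (· ≠ '/') := by
  simp only [ne_eq, decide_not]
  have htw := tw_self t ht
  rcases h with rfl | ⟨u, hu⟩
  · simp [hk, htw]
  · subst hk
    have : rt = '/' :: (t ++ '/' :: u) := by simpa using hu.symm
    subst this
    simp [List.takeWhile_append, htw]

theorem match_conv (k rt t : List Char) (hk : k = '/' :: t)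
    (hhd : rt.head? = some '/') (ht' : t = rt.tail.takeWhile (· ≠ '/')) :
    rt = k ∨ k ++ ['/'] <+: rt := by
  simp only [ne_eq, decide_not] at ht'
  obtain ⟨u, rfl⟩ : ∃ u, rt = '/' :: u := by
    cases rt with
    | nil => simp at hhd
    | cons a l => simp at hhd; exact ⟨l, by rw [hhd]⟩
  simp only [List.tail_cons] at ht'
  rcases hd : u.dropWhile (fun x => !decide (x = '/')) with _ | ⟨c, d⟩
  · left
    have hsplit := List.takeWhile_append_dropWhile (p := fun x : Char => !decide (x = '/')) (l := u)
    rw [hd, List.append_nil] at hsplit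
    rw [hk, ht', hsplit]
  · right
    have hc : c = '/' := by
      have hne : u.dropWhile (fun x => !decide (x = '/')) ≠ [] := by rw [hd]; simp
      have h1 := List.head_dropWhile_not (p := fun x : Char => !decide (x = '/')) (l := u) hne
      have h2 : (u.dropWhile (fun x => !decide (x = '/'))).head? = some c := by rw [hd]; rfl
      rw [List.head?_eq_some_head hne] at h2
      simp at h1
      rw [← h1]
      exact (Option.some_injective _ h2).symm
    have hsplit := List.takeWhile_append_dropWhile (p := fun x : Char => !decide (x = '/')) (l := u)
    rw [hd, hc] at hsplit
    exact ⟨d, by rw [hk, ht']; simpa using hsplit⟩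

-- rfind returns at least any position where sub occurs
theorem rgo_ne (s sub : List Char) (j p : Nat) (hpj : p ≤ j) (hp : sub.isPrefixOf (s.drop p)) :
    PySem.Chars.rfind.go s sub j ≠ -1 ∧ (p : Int) ≤ PySem.Chars.rfind.go s sub j := by
  induction j with
  | zero =>
    have hp0 : p = 0 := Nat.le_zero.mp hpj
    subst hp0
    simp only [PySem.Chars.rfind.go]
    simp only [List.drop_zero] at hp
    simp [hp]
  | succ j ih =>
    simp only [PySem.Chars.rfind.go]
    by_cases hq : sub.isPrefixOf (s.drop (j+1))
    · simp only [hq, if_true]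
      constructor
      · intro h; omega
      · exact_mod_cast Int.ofNat_le.mpr hpj
    · simp only [hq]
      have hpj' : p ≤ j := by
        by_contra hgt
        have hpe : p = j + 1 := by omega
        subst hpe
        exact hq hp
      exact ih hpj'

theorem rfind_ge (cand : List Char) (p : Nat) (hple : p ≤ cand.length)
    (hp : (['/'] : List Char).isPrefixOf (cand.drop p)) :
    PySem.Chars.rfind cand ['/'] ≠ -1 ∧ (p : Int) ≤ PySem.Chars.rfind cand ['/'] := by
  unfold PySem.Chars.rfind
  exact rgo_ne cand ['/'] cand.length p hple hp

theorem bGo_nil : bGo [] = 0 := by rw [bGo]; simp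

theorem bGo_some (cand : List Char) (v : Int) (hne : cand ≠ [])
    (hg : navDict.get? cand = some v) : bGo cand = v := by
  rw [bGo]
  simp [hne, hg]

theorem bGo_none (cand : List Char) (hne : cand ≠ []) (hg : navDict.get? cand = none)
    (hi : PySem.Chars.rfind cand ['/'] ≠ -1) :
    bGo cand = bGo (PySem.Chars.slice cand none (some (PySem.Chars.rfind cand ['/']))) := by
  rw [bGo]
  simp [hne, hg, hi]

theorem bGo_match (k t : List Char) (v : Int) (hget : navDict.get? k = some v)
    (hk : k = '/' :: t) (_ht : '/' ∉ t) :
    ∀ cand, (cand = k ∨ k ++ ['/'] <+: cand) → bGo cand = v := by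
  have main : ∀ n cand, cand.length = n → (cand = k ∨ k ++ ['/'] <+: cand) → bGo cand = v := by
    intro n
    induction n using Nat.strong_induction_on with
    | _ n ih =>
      intro cand hlen hM
      have hne : cand ≠ [] := by
        rcases hM with rfl | ⟨u, hu⟩
        · rw [hk]; simp
        · rw [← hu, hk]; simp
      cases hg : navDict.get? cand with
      | some v' =>
        rw [bGo_some cand v' hne hg]
        have hmem := get?_cases cand v' hg
        have hshape := keys_shape _ hmem
        rcases hM with rfl | ⟨u, hu⟩
        · rw [hget] at hg; exact (Option.some_injective _ hg).symm
        · exfalso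
          have hcand : cand = '/' :: (t ++ '/' :: u) := by rw [hk] at hu; simpa using hu.symm
          have : '/' ∈ cand.tail := by rw [hcand]; simp
          exact hshape.2 this
      | none =>
        have hpre : k ++ ['/'] <+: cand := by
          rcases hM with rfl | h
          · rw [hget] at hg; cases hg
          · exact h
        obtain ⟨u, hu⟩ := hpre
        have hcand : cand = k ++ '/' :: u := by rw [← hu]; simp
        have hdrop : cand.drop k.length = '/' :: u := by rw [hcand, List.drop_left' rfl]
        have hpfx : (['/'] : List Char).isPrefixOf (cand.drop k.length) := by
          rw [hdrop]; simp [List.isPrefixOf]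
        have hklen : k.length ≤ cand.length := by rw [hcand]; simp
        obtain ⟨hno, hge⟩ := rfind_ge cand k.length hklen hpfx
        rw [bGo_none cand hne hg hno]
        obtain ⟨h0, hlt, _⟩ := rfind_slash_lt cand hno
        set i := PySem.Chars.rfind cand ['/'] with hidef
        rw [PySem.Chars.slice_eq_listSlice, PySem.List.slice_to cand h0]
        have hkle : k.length ≤ i.toNat := by omega
        refine ih (cand.take i.toNat).length ?_ _ rfl ?_
        · simp only [List.length_take]
          omega
        · rcases Nat.eq_or_lt_of_le hkle with heq | hlt2
          · left
            rw [← heq, hcand, List.take_left]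
          · right
            refine List.prefix_take_iff.mpr ⟨⟨u, hu⟩, ?_⟩
            simp only [List.length_append, List.length_singleton]
            omega
  exact fun cand => main cand.length cand rfl

theorem bGo_nomatch : ∀ cand : List Char,
    (∀ kv ∈ navItems, kv.1 = ['/'] ∨ ¬ (cand = kv.1 ∨ kv.1 ++ ['/'] <+: cand)) → bGo cand = 0 := by
  have main : ∀ n cand, cand.length = n →
      (∀ kv ∈ navItems, kv.1 = ['/'] ∨ ¬ (cand = kv.1 ∨ kv.1 ++ ['/'] <+: cand)) → bGo cand = 0 := by
    intro n
    induction n using Nat.strong_induction_on with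
    | _ n ih =>
      intro cand hlen hH
      by_cases hne : cand = []
      · rw [hne, bGo_nil]
      cases hg : navDict.get? cand with
      | some v =>
        rw [bGo_some cand v hne hg]
        have hmem := get?_cases cand v hg
        rcases hH _ hmem with hroot | hnm
        · have hcand : cand = ['/'] := hroot
          have hgv : navDict.get? ['/'] = some v := by rw [← hcand]; exact hg
          have h2 : navDict.get? ['/'] = some 0 := by decide
          rw [h2] at hgv
          exact (Option.some_injective _ hgv).symm
        · exact absurd (Or.inl rfl) hnm
      | none =>
        cases hi : decide (PySem.Chars.rfind cand ['/'] = -1) with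
        | true =>
          rw [bGo]
          simp [hne, hg, of_decide_eq_true hi, bGo_nil]
        | false =>
          have hno := of_decide_eq_false hi
          rw [bGo_none cand hne hg hno]
          obtain ⟨h0, hlt, hp2⟩ := rfind_slash_lt cand hno
          set i := PySem.Chars.rfind cand ['/'] with hidef
          rw [PySem.Chars.slice_eq_listSlice, PySem.List.slice_to cand h0]
          have hsplit : cand = cand.take i.toNat ++ ['/'] ++ (cand.drop i.toNat).tail := by
            have hdt : cand.drop i.toNat = '/' :: (cand.drop i.toNat).tail := by
              cases hdc : cand.drop i.toNat with
              | nil => rw [hdc] at hp2; simp [List.isPrefixOf] at hp2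
              | cons a l =>
                rw [hdc] at hp2
                simp [List.isPrefixOf] at hp2
                simp [hp2.symm]
            conv_lhs => rw [← List.take_append_drop i.toNat cand]
            rw [hdt]
            simp
          refine ih (cand.take i.toNat).length ?_ _ rfl ?_
          · simp only [List.length_take]; omega
          intro kv hkv
          rcases hH _ hkv with hroot | hnm
          · exact Or.inl hroot
          right
          rintro (heq | hpfx)
          · refine hnm (Or.inr ?_)
            rw [← heq]
            exact ⟨(cand.drop i.toNat).tail, hsplit.symm⟩
          · exact hnm (Or.inr (hpfx.trans (List.take_prefix _ _)))
  exact fun cand => main cand.length cand rfl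

set_option maxHeartbeats 2000000 in
theorem main_lists : ∀ rt : List Char, aGo rt = bGo rt := by
  intro rt
  -- A's condition is never satisfied by keys other than the canonical '/'-prefix of rt
  have hnoC : ∀ (k t : List Char), k = '/' :: t → '/' ∉ t → k ≠ ['/'] →
      ¬ (rt.head? = some '/' ∧ t = rt.tail.takeWhile (· ≠ '/')) → ¬ C k rt :=
    fun k t hk ht hkr hbad hc => hbad (match_shape k rt t hk ht ((C_iff k rt hkr).mp hc))
  by_cases h0 : rt = ['/']
  · rw [h0]
    have ha : aGo ['/'] = 0 := by decide
    rw [ha, bGo_some ['/'] 0 (by simp) (by decide)]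
  by_cases hh : rt.head? = some '/'
  case neg =>
    -- rt does not start with '/', so no base route matches
    have hc1 : ¬ C "/home".toList rt := hnoC _ "home".toList (by decide) (by decide) (by decide) (fun hx => hh hx.1)
    have hc2 : ¬ C "/analyze_pdf".toList rt := hnoC _ "analyze_pdf".toList (by decide) (by decide) (by decide) (fun hx => hh hx.1)
    have hc3 : ¬ C "/chat_pdf".toList rt := hnoC _ "chat_pdf".toList (by decide) (by decide) (by decide) (fun hx => hh hx.1)
    have hc4 : ¬ C "/knowledge_base".toList rt := hnoC _ "knowledge_base".toList (by decide) (by decide) (by decide) (fun hx => hh hx.1)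
    have hc5 : ¬ C "/wiki_rotinas".toList rt := hnoC _ "wiki_rotinas".toList (by decide) (by decide) (by decide) (fun hx => hh hx.1)
    have hc6 : ¬ C "/correicao_processos".toList rt := hnoC _ "correicao_processos".toList (by decide) (by decide) (by decide) (fun hx => hh hx.1)
    have hc7 : ¬ C "/roteiro_investigacoes".toList rt := hnoC _ "roteiro_investigacoes".toList (by decide) (by decide) (by decide) (fun hx => hh hx.1)
    have hb : bGo rt = 0 := by
      apply bGo_nomatch
      intro kv hkv
      by_cases hr : kv.1 = ['/']
      · exact Or.inl hr
      right
      intro hM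
      obtain ⟨hhd, htl⟩ := keys_shape _ hkv
      have hk : kv.1 = '/' :: kv.1.tail := by
        cases hkc : kv.1 with
        | nil => rw [hkc] at hhd; simp at hhd
        | cons a l => rw [hkc] at hhd; simp at hhd; simp [hhd]
      exact hh (match_shape kv.1 rt kv.1.tail hk htl hM).1
    rw [hb]
    rw [aGo, items_eq, navItems, if_neg h0]
    rw [List.foldl_cons, aStep_root rt _ h0]
    rw [List.foldl_cons, aStep_no rt _ _ (by decide) hc1]
    rw [List.foldl_cons, aStep_no rt _ _ (by decide) hc2]
    rw [List.foldl_cons, aStep_no rt _ _ (by decide) hc3]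
    rw [List.foldl_cons, aStep_no rt _ _ (by decide) hc4]
    rw [List.foldl_cons, aStep_no rt _ _ (by decide) hc5]
    rw [List.foldl_cons, aStep_no rt _ _ (by decide) hc6]
    rw [List.foldl_cons, aStep_no rt _ _ (by decide) hc7]
    rw [List.foldl_nil]
  case pos =>
    by_cases ht1 : rt.tail.takeWhile (· ≠ '/') = "home".toList
    · -- rt lies under "/home"
      have hc1 : C "/home".toList rt := (C_iff _ rt (by decide)).mpr (match_conv "/home".toList rt "home".toList (by decide) hh ht1.symm)
      have hc2 : ¬ C "/analyze_pdf".toList rt := hnoC "/analyze_pdf".toList "analyze_pdf".toList (by decide) (by decide) (by decide) (fun hx => (by decide : "analyze_pdf".toList ≠ "home".toList) (hx.2.trans ht1))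
      have hc3 : ¬ C "/chat_pdf".toList rt := hnoC "/chat_pdf".toList "chat_pdf".toList (by decide) (by decide) (by decide) (fun hx => (by decide : "chat_pdf".toList ≠ "home".toList) (hx.2.trans ht1))
      have hc4 : ¬ C "/knowledge_base".toList rt := hnoC "/knowledge_base".toList "knowledge_base".toList (by decide) (by decide) (by decide) (fun hx => (by decide : "knowledge_base".toList ≠ "home".toList) (hx.2.trans ht1))
      have hc5 : ¬ C "/wiki_rotinas".toList rt := hnoC "/wiki_rotinas".toList "wiki_rotinas".toList (by decide) (by decide) (by decide) (fun hx => (by decide : "wiki_rotinas".toList ≠ "home".toList) (hx.2.trans ht1))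
      have hc6 : ¬ C "/correicao_processos".toList rt := hnoC "/correicao_processos".toList "correicao_processos".toList (by decide) (by decide) (by decide) (fun hx => (by decide : "correicao_processos".toList ≠ "home".toList) (hx.2.trans ht1))
      have hc7 : ¬ C "/roteiro_investigacoes".toList rt := hnoC "/roteiro_investigacoes".toList "roteiro_investigacoes".toList (by decide) (by decide) (by decide) (fun hx => (by decide : "roteiro_investigacoes".toList ≠ "home".toList) (hx.2.trans ht1))
      have hM : rt = "/home".toList ∨ "/home".toList ++ ['/'] <+: rt := (C_iff _ rt (by decide)).mp hc1
      rw [bGo_match "/home".toList "home".toList 0 (by decide) (by decide) (by decide) rt hM]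
      rw [aGo, items_eq, navItems, if_neg h0]
      rw [List.foldl_cons, aStep_root rt _ h0]
      rw [List.foldl_cons, aStep_yes rt _ _ hc1 (by decide)]
      rw [List.foldl_cons, aStep_no rt _ _ (by decide) hc2]
      rw [List.foldl_cons, aStep_no rt _ _ (by decide) hc3]
      rw [List.foldl_cons, aStep_no rt _ _ (by decide) hc4]
      rw [List.foldl_cons, aStep_no rt _ _ (by decide) hc5]
      rw [List.foldl_cons, aStep_no rt _ _ (by decide) hc6]
      rw [List.foldl_cons, aStep_no rt _ _ (by decide) hc7]
      rw [List.foldl_nil]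
    by_cases ht2 : rt.tail.takeWhile (· ≠ '/') = "analyze_pdf".toList
    · -- rt lies under "/analyze_pdf"
      have hc1 : ¬ C "/home".toList rt := hnoC "/home".toList "home".toList (by decide) (by decide) (by decide) (fun hx => (by decide : "home".toList ≠ "analyze_pdf".toList) (hx.2.trans ht2))
      have hc2 : C "/analyze_pdf".toList rt := (C_iff _ rt (by decide)).mpr (match_conv "/analyze_pdf".toList rt "analyze_pdf".toList (by decide) hh ht2.symm)
      have hc3 : ¬ C "/chat_pdf".toList rt := hnoC "/chat_pdf".toList "chat_pdf".toList (by decide) (by decide) (by decide) (fun hx => (by decide : "chat_pdf".toList ≠ "analyze_pdf".toList) (hx.2.trans ht2))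
      have hc4 : ¬ C "/knowledge_base".toList rt := hnoC "/knowledge_base".toList "knowledge_base".toList (by decide) (by decide) (by decide) (fun hx => (by decide : "knowledge_base".toList ≠ "analyze_pdf".toList) (hx.2.trans ht2))
      have hc5 : ¬ C "/wiki_rotinas".toList rt := hnoC "/wiki_rotinas".toList "wiki_rotinas".toList (by decide) (by decide) (by decide) (fun hx => (by decide : "wiki_rotinas".toList ≠ "analyze_pdf".toList) (hx.2.trans ht2))
      have hc6 : ¬ C "/correicao_processos".toList rt := hnoC "/correicao_processos".toList "correicao_processos".toList (by decide) (by decide) (by decide) (fun hx => (by decide : "correicao_processos".toList ≠ "analyze_pdf".toList) (hx.2.trans ht2))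
      have hc7 : ¬ C "/roteiro_investigacoes".toList rt := hnoC "/roteiro_investigacoes".toList "roteiro_investigacoes".toList (by decide) (by decide) (by decide) (fun hx => (by decide : "roteiro_investigacoes".toList ≠ "analyze_pdf".toList) (hx.2.trans ht2))
      have hM : rt = "/analyze_pdf".toList ∨ "/analyze_pdf".toList ++ ['/'] <+: rt := (C_iff _ rt (by decide)).mp hc2
      rw [bGo_match "/analyze_pdf".toList "analyze_pdf".toList 1 (by decide) (by decide) (by decide) rt hM]
      rw [aGo, items_eq, navItems, if_neg h0]
      rw [List.foldl_cons, aStep_root rt _ h0]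
      rw [List.foldl_cons, aStep_no rt _ _ (by decide) hc1]
      rw [List.foldl_cons, aStep_yes rt _ _ hc2 (by decide)]
      rw [List.foldl_cons, aStep_no rt _ _ (by decide) hc3]
      rw [List.foldl_cons, aStep_no rt _ _ (by decide) hc4]
      rw [List.foldl_cons, aStep_no rt _ _ (by decide) hc5]
      rw [List.foldl_cons, aStep_no rt _ _ (by decide) hc6]
      rw [List.foldl_cons, aStep_no rt _ _ (by decide) hc7]
      rw [List.foldl_nil]
    by_cases ht3 : rt.tail.takeWhile (· ≠ '/') = "chat_pdf".toList
    · -- rt lies under "/chat_pdf"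
      have hc1 : ¬ C "/home".toList rt := hnoC "/home".toList "home".toList (by decide) (by decide) (by decide) (fun hx => (by decide : "home".toList ≠ "chat_pdf".toList) (hx.2.trans ht3))
      have hc2 : ¬ C "/analyze_pdf".toList rt := hnoC "/analyze_pdf".toList "analyze_pdf".toList (by decide) (by decide) (by decide) (fun hx => (by decide : "analyze_pdf".toList ≠ "chat_pdf".toList) (hx.2.trans ht3))
      have hc3 : C "/chat_pdf".toList rt := (C_iff _ rt (by decide)).mpr (match_conv "/chat_pdf".toList rt "chat_pdf".toList (by decide) hh ht3.symm)
      have hc4 : ¬ C "/knowledge_base".toList rt := hnoC "/knowledge_base".toList "knowledge_base".toList (by decide) (by decide) (by decide) (fun hx => (by decide : "knowledge_base".toList ≠ "chat_pdf".toList) (hx.2.trans ht3))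
      have hc5 : ¬ C "/wiki_rotinas".toList rt := hnoC "/wiki_rotinas".toList "wiki_rotinas".toList (by decide) (by decide) (by decide) (fun hx => (by decide : "wiki_rotinas".toList ≠ "chat_pdf".toList) (hx.2.trans ht3))
      have hc6 : ¬ C "/correicao_processos".toList rt := hnoC "/correicao_processos".toList "correicao_processos".toList (by decide) (by decide) (by decide) (fun hx => (by decide : "correicao_processos".toList ≠ "chat_pdf".toList) (hx.2.trans ht3))
      have hc7 : ¬ C "/roteiro_investigacoes".toList rt := hnoC "/roteiro_investigacoes".toList "roteiro_investigacoes".toList (by decide) (by decide) (by decide) (fun hx => (by decide : "roteiro_investigacoes".toList ≠ "chat_pdf".toList) (hx.2.trans ht3))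
      have hM : rt = "/chat_pdf".toList ∨ "/chat_pdf".toList ++ ['/'] <+: rt := (C_iff _ rt (by decide)).mp hc3
      rw [bGo_match "/chat_pdf".toList "chat_pdf".toList 2 (by decide) (by decide) (by decide) rt hM]
      rw [aGo, items_eq, navItems, if_neg h0]
      rw [List.foldl_cons, aStep_root rt _ h0]
      rw [List.foldl_cons, aStep_no rt _ _ (by decide) hc1]
      rw [List.foldl_cons, aStep_no rt _ _ (by decide) hc2]
      rw [List.foldl_cons, aStep_yes rt _ _ hc3 (by decide)]
      rw [List.foldl_cons, aStep_no rt _ _ (by decide) hc4]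
      rw [List.foldl_cons, aStep_no rt _ _ (by decide) hc5]
      rw [List.foldl_cons, aStep_no rt _ _ (by decide) hc6]
      rw [List.foldl_cons, aStep_no rt _ _ (by decide) hc7]
      rw [List.foldl_nil]
    by_cases ht4 : rt.tail.takeWhile (· ≠ '/') = "knowledge_base".toList
    · -- rt lies under "/knowledge_base"
      have hc1 : ¬ C "/home".toList rt := hnoC "/home".toList "home".toList (by decide) (by decide) (by decide) (fun hx => (by decide : "home".toList ≠ "knowledge_base".toList) (hx.2.trans ht4))
      have hc2 : ¬ C "/analyze_pdf".toList rt := hnoC "/analyze_pdf".toList "analyze_pdf".toList (by decide) (by decide) (by decide) (fun hx => (by decide : "analyze_pdf".toList ≠ "knowledge_base".toList) (hx.2.trans ht4))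
      have hc3 : ¬ C "/chat_pdf".toList rt := hnoC "/chat_pdf".toList "chat_pdf".toList (by decide) (by decide) (by decide) (fun hx => (by decide : "chat_pdf".toList ≠ "knowledge_base".toList) (hx.2.trans ht4))
      have hc4 : C "/knowledge_base".toList rt := (C_iff _ rt (by decide)).mpr (match_conv "/knowledge_base".toList rt "knowledge_base".toList (by decide) hh ht4.symm)
      have hc5 : ¬ C "/wiki_rotinas".toList rt := hnoC "/wiki_rotinas".toList "wiki_rotinas".toList (by decide) (by decide) (by decide) (fun hx => (by decide : "wiki_rotinas".toList ≠ "knowledge_base".toList) (hx.2.trans ht4))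
      have hc6 : ¬ C "/correicao_processos".toList rt := hnoC "/correicao_processos".toList "correicao_processos".toList (by decide) (by decide) (by decide) (fun hx => (by decide : "correicao_processos".toList ≠ "knowledge_base".toList) (hx.2.trans ht4))
      have hc7 : ¬ C "/roteiro_investigacoes".toList rt := hnoC "/roteiro_investigacoes".toList "roteiro_investigacoes".toList (by decide) (by decide) (by decide) (fun hx => (by decide : "roteiro_investigacoes".toList ≠ "knowledge_base".toList) (hx.2.trans ht4))
      have hM : rt = "/knowledge_base".toList ∨ "/knowledge_base".toList ++ ['/'] <+: rt := (C_iff _ rt (by decide)).mp hc4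
      rw [bGo_match "/knowledge_base".toList "knowledge_base".toList 3 (by decide) (by decide) (by decide) rt hM]
      rw [aGo, items_eq, navItems, if_neg h0]
      rw [List.foldl_cons, aStep_root rt _ h0]
      rw [List.foldl_cons, aStep_no rt _ _ (by decide) hc1]
      rw [List.foldl_cons, aStep_no rt _ _ (by decide) hc2]
      rw [List.foldl_cons, aStep_no rt _ _ (by decide) hc3]
      rw [List.foldl_cons, aStep_yes rt _ _ hc4 (by decide)]
      rw [List.foldl_cons, aStep_no rt _ _ (by decide) hc5]
      rw [List.foldl_cons, aStep_no rt _ _ (by decide) hc6]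
      rw [List.foldl_cons, aStep_no rt _ _ (by decide) hc7]
      rw [List.foldl_nil]
    by_cases ht5 : rt.tail.takeWhile (· ≠ '/') = "wiki_rotinas".toList
    · -- rt lies under "/wiki_rotinas"
      have hc1 : ¬ C "/home".toList rt := hnoC "/home".toList "home".toList (by decide) (by decide) (by decide) (fun hx => (by decide : "home".toList ≠ "wiki_rotinas".toList) (hx.2.trans ht5))
      have hc2 : ¬ C "/analyze_pdf".toList rt := hnoC "/analyze_pdf".toList "analyze_pdf".toList (by decide) (by decide) (by decide) (fun hx => (by decide : "analyze_pdf".toList ≠ "wiki_rotinas".toList) (hx.2.trans ht5))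
      have hc3 : ¬ C "/chat_pdf".toList rt := hnoC "/chat_pdf".toList "chat_pdf".toList (by decide) (by decide) (by decide) (fun hx => (by decide : "chat_pdf".toList ≠ "wiki_rotinas".toList) (hx.2.trans ht5))
      have hc4 : ¬ C "/knowledge_base".toList rt := hnoC "/knowledge_base".toList "knowledge_base".toList (by decide) (by decide) (by decide) (fun hx => (by decide : "knowledge_base".toList ≠ "wiki_rotinas".toList) (hx.2.trans ht5))
      have hc5 : C "/wiki_rotinas".toList rt := (C_iff _ rt (by decide)).mpr (match_conv "/wiki_rotinas".toList rt "wiki_rotinas".toList (by decide) hh ht5.symm)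
      have hc6 : ¬ C "/correicao_processos".toList rt := hnoC "/correicao_processos".toList "correicao_processos".toList (by decide) (by decide) (by decide) (fun hx => (by decide : "correicao_processos".toList ≠ "wiki_rotinas".toList) (hx.2.trans ht5))
      have hc7 : ¬ C "/roteiro_investigacoes".toList rt := hnoC "/roteiro_investigacoes".toList "roteiro_investigacoes".toList (by decide) (by decide) (by decide) (fun hx => (by decide : "roteiro_investigacoes".toList ≠ "wiki_rotinas".toList) (hx.2.trans ht5))
      have hM : rt = "/wiki_rotinas".toList ∨ "/wiki_rotinas".toList ++ ['/'] <+: rt := (C_iff _ rt (by decide)).mp hc5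
      rw [bGo_match "/wiki_rotinas".toList "wiki_rotinas".toList 4 (by decide) (by decide) (by decide) rt hM]
      rw [aGo, items_eq, navItems, if_neg h0]
      rw [List.foldl_cons, aStep_root rt _ h0]
      rw [List.foldl_cons, aStep_no rt _ _ (by decide) hc1]
      rw [List.foldl_cons, aStep_no rt _ _ (by decide) hc2]
      rw [List.foldl_cons, aStep_no rt _ _ (by decide) hc3]
      rw [List.foldl_cons, aStep_no rt _ _ (by decide) hc4]
      rw [List.foldl_cons, aStep_yes rt _ _ hc5 (by decide)]
      rw [List.foldl_cons, aStep_no rt _ _ (by decide) hc6]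
      rw [List.foldl_cons, aStep_no rt _ _ (by decide) hc7]
      rw [List.foldl_nil]
    by_cases ht6 : rt.tail.takeWhile (· ≠ '/') = "correicao_processos".toList
    · -- rt lies under "/correicao_processos"
      have hc1 : ¬ C "/home".toList rt := hnoC "/home".toList "home".toList (by decide) (by decide) (by decide) (fun hx => (by decide : "home".toList ≠ "correicao_processos".toList) (hx.2.trans ht6))
      have hc2 : ¬ C "/analyze_pdf".toList rt := hnoC "/analyze_pdf".toList "analyze_pdf".toList (by decide) (by decide) (by decide) (fun hx => (by decide : "analyze_pdf".toList ≠ "correicao_processos".toList) (hx.2.trans ht6))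
      have hc3 : ¬ C "/chat_pdf".toList rt := hnoC "/chat_pdf".toList "chat_pdf".toList (by decide) (by decide) (by decide) (fun hx => (by decide : "chat_pdf".toList ≠ "correicao_processos".toList) (hx.2.trans ht6))
      have hc4 : ¬ C "/knowledge_base".toList rt := hnoC "/knowledge_base".toList "knowledge_base".toList (by decide) (by decide) (by decide) (fun hx => (by decide : "knowledge_base".toList ≠ "correicao_processos".toList) (hx.2.trans ht6))
      have hc5 : ¬ C "/wiki_rotinas".toList rt := hnoC "/wiki_rotinas".toList "wiki_rotinas".toList (by decide) (by decide) (by decide) (fun hx => (by decide : "wiki_rotinas".toList ≠ "correicao_processos".toList) (hx.2.trans ht6))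
      have hc6 : C "/correicao_processos".toList rt := (C_iff _ rt (by decide)).mpr (match_conv "/correicao_processos".toList rt "correicao_processos".toList (by decide) hh ht6.symm)
      have hc7 : ¬ C "/roteiro_investigacoes".toList rt := hnoC "/roteiro_investigacoes".toList "roteiro_investigacoes".toList (by decide) (by decide) (by decide) (fun hx => (by decide : "roteiro_investigacoes".toList ≠ "correicao_processos".toList) (hx.2.trans ht6))
      have hM : rt = "/correicao_processos".toList ∨ "/correicao_processos".toList ++ ['/'] <+: rt := (C_iff _ rt (by decide)).mp hc6
      rw [bGo_match "/correicao_processos".toList "correicao_processos".toList 5 (by decide) (by decide) (by decide) rt hM]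
      rw [aGo, items_eq, navItems, if_neg h0]
      rw [List.foldl_cons, aStep_root rt _ h0]
      rw [List.foldl_cons, aStep_no rt _ _ (by decide) hc1]
      rw [List.foldl_cons, aStep_no rt _ _ (by decide) hc2]
      rw [List.foldl_cons, aStep_no rt _ _ (by decide) hc3]
      rw [List.foldl_cons, aStep_no rt _ _ (by decide) hc4]
      rw [List.foldl_cons, aStep_no rt _ _ (by decide) hc5]
      rw [List.foldl_cons, aStep_yes rt _ _ hc6 (by decide)]
      rw [List.foldl_cons, aStep_no rt _ _ (by decide) hc7]
      rw [List.foldl_nil]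
    by_cases ht7 : rt.tail.takeWhile (· ≠ '/') = "roteiro_investigacoes".toList
    · -- rt lies under "/roteiro_investigacoes"
      have hc1 : ¬ C "/home".toList rt := hnoC "/home".toList "home".toList (by decide) (by decide) (by decide) (fun hx => (by decide : "home".toList ≠ "roteiro_investigacoes".toList) (hx.2.trans ht7))
      have hc2 : ¬ C "/analyze_pdf".toList rt := hnoC "/analyze_pdf".toList "analyze_pdf".toList (by decide) (by decide) (by decide) (fun hx => (by decide : "analyze_pdf".toList ≠ "roteiro_investigacoes".toList) (hx.2.trans ht7))
      have hc3 : ¬ C "/chat_pdf".toList rt := hnoC "/chat_pdf".toList "chat_pdf".toList (by decide) (by decide) (by decide) (fun hx => (by decide : "chat_pdf".toList ≠ "roteiro_investigacoes".toList) (hx.2.trans ht7))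
      have hc4 : ¬ C "/knowledge_base".toList rt := hnoC "/knowledge_base".toList "knowledge_base".toList (by decide) (by decide) (by decide) (fun hx => (by decide : "knowledge_base".toList ≠ "roteiro_investigacoes".toList) (hx.2.trans ht7))
      have hc5 : ¬ C "/wiki_rotinas".toList rt := hnoC "/wiki_rotinas".toList "wiki_rotinas".toList (by decide) (by decide) (by decide) (fun hx => (by decide : "wiki_rotinas".toList ≠ "roteiro_investigacoes".toList) (hx.2.trans ht7))
      have hc6 : ¬ C "/correicao_processos".toList rt := hnoC "/correicao_processos".toList "correicao_processos".toList (by decide) (by decide) (by decide) (fun hx => (by decide : "correicao_processos".toList ≠ "roteiro_investigacoes".toList) (hx.2.trans ht7))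
      have hc7 : C "/roteiro_investigacoes".toList rt := (C_iff _ rt (by decide)).mpr (match_conv "/roteiro_investigacoes".toList rt "roteiro_investigacoes".toList (by decide) hh ht7.symm)
      have hM : rt = "/roteiro_investigacoes".toList ∨ "/roteiro_investigacoes".toList ++ ['/'] <+: rt := (C_iff _ rt (by decide)).mp hc7
      rw [bGo_match "/roteiro_investigacoes".toList "roteiro_investigacoes".toList 6 (by decide) (by decide) (by decide) rt hM]
      rw [aGo, items_eq, navItems, if_neg h0]
      rw [List.foldl_cons, aStep_root rt _ h0]
      rw [List.foldl_cons, aStep_no rt _ _ (by decide) hc1]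
      rw [List.foldl_cons, aStep_no rt _ _ (by decide) hc2]
      rw [List.foldl_cons, aStep_no rt _ _ (by decide) hc3]
      rw [List.foldl_cons, aStep_no rt _ _ (by decide) hc4]
      rw [List.foldl_cons, aStep_no rt _ _ (by decide) hc5]
      rw [List.foldl_cons, aStep_no rt _ _ (by decide) hc6]
      rw [List.foldl_cons, aStep_yes rt _ _ hc7 (by decide)]
      rw [List.foldl_nil]
  -- no key tail equals the first segment of rt: nothing matches
    have hc1 : ¬ C "/home".toList rt := hnoC "/home".toList "home".toList (by decide) (by decide) (by decide) (fun hx => ht1 hx.2.symm)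
    have hc2 : ¬ C "/analyze_pdf".toList rt := hnoC "/analyze_pdf".toList "analyze_pdf".toList (by decide) (by decide) (by decide) (fun hx => ht2 hx.2.symm)
    have hc3 : ¬ C "/chat_pdf".toList rt := hnoC "/chat_pdf".toList "chat_pdf".toList (by decide) (by decide) (by decide) (fun hx => ht3 hx.2.symm)
    have hc4 : ¬ C "/knowledge_base".toList rt := hnoC "/knowledge_base".toList "knowledge_base".toList (by decide) (by decide) (by decide) (fun hx => ht4 hx.2.symm)
    have hc5 : ¬ C "/wiki_rotinas".toList rt := hnoC "/wiki_rotinas".toList "wiki_rotinas".toList (by decide) (by decide) (by decide) (fun hx => ht5 hx.2.symm)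
    have hc6 : ¬ C "/correicao_processos".toList rt := hnoC "/correicao_processos".toList "correicao_processos".toList (by decide) (by decide) (by decide) (fun hx => ht6 hx.2.symm)
    have hc7 : ¬ C "/roteiro_investigacoes".toList rt := hnoC "/roteiro_investigacoes".toList "roteiro_investigacoes".toList (by decide) (by decide) (by decide) (fun hx => ht7 hx.2.symm)
    have hb : bGo rt = 0 := by
      apply bGo_nomatch
      intro kv hkv
      by_cases hr : kv.1 = ['/']
      · exact Or.inl hr
      right
      intro hM
      obtain ⟨hhd, htl⟩ := keys_shape _ hkv
      have hk : kv.1 = '/' :: kv.1.tail := by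
        cases hkc : kv.1 with
        | nil => rw [hkc] at hhd; simp at hhd
        | cons a l => rw [hkc] at hhd; simp at hhd; simp [hhd]
      have hsh := (match_shape kv.1 rt kv.1.tail hk htl hM).2
      rcases keys_tails _ hkv with h | h | h | h | h | h | h | h
      · rw [h] at hk; exact hr (by rw [hk]; rfl)
      · exact ht1 (h ▸ hsh).symm
      · exact ht2 (h ▸ hsh).symm
      · exact ht3 (h ▸ hsh).symm
      · exact ht4 (h ▸ hsh).symm
      · exact ht5 (h ▸ hsh).symm
      · exact ht6 (h ▸ hsh).symm
      · exact ht7 (h ▸ hsh).symm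
    rw [hb]
    rw [aGo, items_eq, navItems, if_neg h0]
    rw [List.foldl_cons, aStep_root rt _ h0]
    rw [List.foldl_cons, aStep_no rt _ _ (by decide) hc1]
    rw [List.foldl_cons, aStep_no rt _ _ (by decide) hc2]
    rw [List.foldl_cons, aStep_no rt _ _ (by decide) hc3]
    rw [List.foldl_cons, aStep_no rt _ _ (by decide) hc4]
    rw [List.foldl_cons, aStep_no rt _ _ (by decide) hc5]
    rw [List.foldl_cons, aStep_no rt _ _ (by decide) hc6]
    rw [List.foldl_cons, aStep_no rt _ _ (by decide) hc7]
    rw [List.foldl_nil]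

-- ===== VERDICT (by name: the statement is the Claim_ definition above) =====
theorem find_nav_index_for_route_py_spec : Claim_equal_find_nav_index_for_route_py := by
  intro route _
  unfold Spec_find_nav_index_for_route_py find_nav_index_for_route_py find_nav_index_for_route_py_alt
  exact main_lists route.toList
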